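-- pv_equiv track=rewrite | github.com/ssj7509/solved | 프로그래머스/1/155652. 둘만의 암호/둘만의 암호.py | solution
-- ===== SOURCE A (Python) =====
-- def solution(s, skip, index):
--     sL=[0]*26
--     for sk in skip:
--         sL[ord(sk)-97]=1
--     answer = ''
--     for c in s:
--         n=ord(c)-97
--         for i in range(index):
--             n=(n+1)%26
--             while sL[n]:n=(n+1)%26
--         answer+=chr(n+97)
--     return answer
-- ===== SOURCE B (Python) =====
-- def solution(s, skip, index):
--     if index <= 0 or not s:
--         return s
--     skipped = [False] * 26
--     for sk in skip:
--         skipped[(ord(sk) - 97) % 26] = True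
--     avail = [n for n in range(26) if not skipped[n]]
--     m = len(avail)
--     # nxt[n] = position in avail of the first available letter strictly after n (cyclically)
--     nxt = [0] * 26
--     p = 0
--     for n in range(26):
--         while p < m and avail[p] <= n:
--             p += 1
--         nxt[n] = p % m
--     out = []
--     for c in s:
--         p0 = nxt[(ord(c) - 97) % 26]
--         out.append(chr(avail[(p0 + index - 1) % m] + 97))
--     return ''.join(out)
-- ===== Notes on version B (the rewrite author's own statement) =====
-- stated objective: faster
-- what changed: Instead of stepping index times per character (each step scanning past skipped letters), B precomputes the cyclic list of available letters and a next-position table once, then answers each character with a single modular index into that list.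
import Mathlib
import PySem

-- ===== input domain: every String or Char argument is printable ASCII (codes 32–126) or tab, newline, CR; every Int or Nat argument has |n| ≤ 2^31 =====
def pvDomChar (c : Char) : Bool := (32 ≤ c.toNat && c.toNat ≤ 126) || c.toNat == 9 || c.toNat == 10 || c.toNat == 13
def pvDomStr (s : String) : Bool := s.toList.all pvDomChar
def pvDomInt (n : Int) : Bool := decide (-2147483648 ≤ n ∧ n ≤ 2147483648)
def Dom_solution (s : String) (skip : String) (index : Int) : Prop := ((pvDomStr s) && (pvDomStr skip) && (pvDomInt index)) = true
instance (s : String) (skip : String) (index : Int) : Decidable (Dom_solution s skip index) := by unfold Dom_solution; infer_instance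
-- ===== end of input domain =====

-- B replaces A's per-character stepping loop (index steps, each scanning past skipped
-- letters) by a precomputed cyclic list of available letters plus one modular lookup
-- per character; objective: faster.

-- ===== PORT A =====
-- 'while sL[n]: n=(n+1)%26' with fuel 26: under Pre_ some letter is unskipped, so
-- Python's loop exits within 26 steps and the fuel is never exhausted.
def skipWhile (sL : List Int) : Nat → Int → Int
  | 0, n => n
  | fuel+1, n =>
      if PySem.List.pyGetD sL n 0 ≠ 0 then skipWhile sL fuel (PySem.Int.mod (n + 1) 26) else n

def solution (s : String) (skip : String) (index : Int) : String :=
  let sL : List Int := skip.toList.foldl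
    (fun sL sk => PySem.List.pySetD sL ((sk.toNat : Int) - 97) 1) (List.replicate 26 0)
  let answer : List Char := s.toList.foldl (fun answer c =>
    let n0 : Int := (c.toNat : Int) - 97
    let n : Int := (PySem.List.pyRange 0 index 1).foldl
      (fun n _ => skipWhile sL 26 (PySem.Int.mod (n + 1) 26)) n0
    answer ++ [Char.ofNat (n + 97).toNat]) []
  String.ofList answer

-- ===== PORT B =====
-- 'while p < m and avail[p] <= n: p += 1' (p only grows, bounded by len(avail))
def advance (avail : List Nat) (n p : Nat) : Nat :=
  if h : p < avail.length ∧ avail.getD p 0 ≤ n then advance avail n (p + 1) else p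
  termination_by avail.length - p
  decreasing_by omega

def solution_alt (s : String) (skip : String) (index : Int) : String :=
  if index ≤ 0 ∨ s.toList = [] then s
  else
    let skipped : List Bool := skip.toList.foldl
      (fun sk c => sk.set (PySem.Int.mod ((c.toNat : Int) - 97) 26).toNat true)
      (List.replicate 26 false)
    let avail : List Nat := (List.range 26).filter (fun n => !skipped.getD n false)
    let m : Nat := avail.length
    let nxt : List Nat := ((List.range 26).foldl
      (fun (st : List Nat × Nat) n => (st.1 ++ [advance avail n st.2 % m], advance avail n st.2))
      ([], 0)).1
    let out : List Char := s.toList.map (fun c =>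
      Char.ofNat (avail.getD
        (PySem.Int.mod ((nxt.getD (PySem.Int.mod ((c.toNat : Int) - 97) 26).toNat 0 : Int)
          + index - 1) (m : Int)).toNat 0 + 97))
    String.ofList out

-- ===== PRECONDITION & SPEC =====
-- Pre_ excludes exactly the inputs where the Python A does not return: a skip character
-- with code outside 71..122 makes 'sL[ord(sk)-97]=1' raise IndexError, and if every
-- letter ends up marked while index ≥ 1 and s is nonempty the 'while' loop never ends.
def Pre_solution (s : String) (skip : String) (index : Int) : Prop :=
  skip.toList.all (fun c => 71 ≤ c.toNat && c.toNat ≤ 122) = true ∧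
  (1 ≤ index → s.toList = [] ∨
    (List.range 26).any (fun j =>
      skip.toList.all (fun c => (PySem.Int.mod ((c.toNat : Int) - 97) 26).toNat != j)) = true)
instance (s : String) (skip : String) (index : Int) : Decidable (Pre_solution s skip index) := by
  unfold Pre_solution; infer_instance

def pvWitness_solution : String × String × Int := ("hello", "abc", 3)

def Spec_solution (s : String) (skip : String) (index : Int) (out : String) : Prop :=
  out = solution_alt s skip index
instance (s : String) (skip : String) (index : Int) (out : String) :
    Decidable (Spec_solution s skip index out) := by unfold Spec_solution; infer_instance

-- ===== CLAIM (what is proved, stated in full; the proofs are below) =====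
def Claim_equal_solution : Prop := ∀ (s : String) (skip : String) (index : Int),
  Dom_solution s skip index → Pre_solution s skip index →
  Spec_solution s skip index (solution s skip index)

-- ===== LEMMAS AND PROOFS =====

def boolToInt (b : Bool) : Int := if b then 1 else 0

def availOf (sk : List Bool) : List Nat := (List.range 26).filter (fun n => !sk.getD n false)

def cntLe (l : List Nat) (n : Nat) : Nat := l.countP (fun x => decide (x ≤ n))
def cntLt (l : List Nat) (n : Nat) : Nat := l.countP (fun x => decide (x < n))

theorem foldl_set_length (L : List Char) (g : Char → Nat) (init : List Bool) :
    (L.foldl (fun sk c => sk.set (g c) true) init).length = init.length := by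
  induction L generalizing init with
  | nil => rfl
  | cons c t ih => simp [List.foldl_cons, ih]

theorem foldl_set_getD (L : List Char) (g : Char → Nat) (init : List Bool) (j : Nat)
    (hg : ∀ c ∈ L, g c < init.length) :
    (L.foldl (fun sk c => sk.set (g c) true) init).getD j false
      = (init.getD j false || L.any (fun c => g c == j)) := by
  induction L generalizing init with
  | nil => simp
  | cons c t ih =>
    have hc := hg c (by simp)
    rw [List.foldl_cons, ih _ (by intro x hx; simpa using hg x (List.mem_cons_of_mem _ hx))]
    by_cases hcj : g c = j
    · subst hcj
      simp [List.getD, hc]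
    · have hb : (g c == j) = false := by simpa using hcj
      simp [List.getD, List.getElem?_set_ne (by omega : g c ≠ j), hb]

theorem avail_pairwise (sk : List Bool) : (availOf sk).Pairwise (· < ·) :=
  List.Pairwise.filter _ List.pairwise_lt_range

theorem mem_availOf (sk : List Bool) (j : Nat) :
    j ∈ availOf sk ↔ j < 26 ∧ sk.getD j false = false := by
  simp [availOf, List.mem_filter, List.mem_range]

theorem cntLt_le_cntLe (l : List Nat) (n : Nat) : cntLt l n ≤ cntLe l n := by
  apply List.countP_mono_left
  intro x _ h
  simp_all
  omega

theorem cntLt_succ (l : List Nat) (a : Nat) : cntLt l (a + 1) = cntLe l a := by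
  apply List.countP_congr
  intro x _
  simp

theorem cntLt_zero (l : List Nat) : cntLt l 0 = 0 := by
  simp [cntLt]

theorem cntLe_all (l : List Nat) (n : Nat) (h : ∀ x ∈ l, x ≤ n) : cntLe l n = l.length := by
  rw [cntLe, List.countP_eq_length]
  intro x hx
  simpa using h x hx


theorem cntLe_cons (a : Nat) (t : List Nat) (n : Nat) :
    cntLe (a :: t) n = cntLe t n + (if a ≤ n then 1 else 0) := by
  simp [cntLe, List.countP_cons]

theorem cntLe_nil_of_gt (t : List Nat) (n : Nat) (h : ∀ x ∈ t, n < x) : cntLe t n = 0 := by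
  rw [cntLe, List.countP_eq_zero]
  intro x hx
  simp only [decide_eq_true_eq] at *
  have := h x hx
  omega

theorem cntLe_getD (l : List Nat) (hl : l.Pairwise (· < ·)) (p : Nat) (hp : p < l.length) :
    cntLe l (l.getD p 0) = p + 1 := by
  induction l generalizing p with
  | nil => simp at hp
  | cons a t ih =>
    rcases List.pairwise_cons.1 hl with ⟨ha, ht⟩
    cases p with
    | zero =>
      rw [List.getD_cons_zero, cntLe_cons, cntLe_nil_of_gt t a ha]
      simp
    | succ q =>
      have hq : q < t.length := by simpa using hp
      have hmem : t.getD q 0 ∈ t := by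
        rw [List.getD_eq_getElem t 0 hq]
        exact List.getElem_mem hq
      have hle : a ≤ t.getD q 0 := le_of_lt (ha _ hmem)
      rw [List.getD_cons_succ, cntLe_cons, ih ht q hq, if_pos hle]

theorem getD_cntLt (l : List Nat) (hl : l.Pairwise (· < ·)) (a : Nat) (ha : a ∈ l) :
    l.getD (cntLt l a) 0 = a := by
  induction l with
  | nil => simp at ha
  | cons b t ih =>
    rcases List.pairwise_cons.1 hl with ⟨hb, ht⟩
    rcases List.mem_cons.1 ha with h | h
    · subst h
      have : t.countP (fun x => decide (x < a)) = 0 := by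
        rw [List.countP_eq_zero]
        intro x hx
        have := hb x hx
        simp only [decide_eq_true_eq]
        omega
      simp [cntLt, this]
    · have hba : b < a := hb a h
      have hc : cntLt (b :: t) a = cntLt t a + 1 := by
        simp [cntLt, hba]
      rw [hc, List.getD_cons_succ]
      exact ih ht h

theorem cntLe_split (l : List Nat) (hl : l.Pairwise (· < ·)) (a : Nat) :
    cntLe l a = cntLt l a + (if a ∈ l then 1 else 0) := by
  induction l with
  | nil => simp [cntLe, cntLt]
  | cons b t ih =>
    rcases List.pairwise_cons.1 hl with ⟨hb, ht⟩
    have iht := ih ht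
    by_cases hba : a = b
    · subst hba
      have hnt : a ∉ t := fun h => absurd (hb a h) (lt_irrefl a)
      simp only [cntLe, cntLt, List.countP_cons] at *
      simp [hnt, iht]
    · simp only [cntLe, cntLt, List.countP_cons] at *
      have : (a ∈ b :: t) = (a ∈ t) := by simp [List.mem_cons, hba]
      by_cases hle : b ≤ a
      · have hlt : b < a := lt_of_le_of_ne hle (fun h => hba h.symm)
        simp [hle, hlt, iht, this]
        split <;> omega
      · have : ¬ b < a := fun h => hle (le_of_lt h)
        simp [hle, this, iht, List.mem_cons, hba]

theorem getD_le_iff (l : List Nat) (hl : l.Pairwise (· < ·)) (n p : Nat) (hp : p < l.length) :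
    (l.getD p 0 ≤ n ↔ p < cntLe l n) := by
  induction l generalizing p with
  | nil => simp at hp
  | cons a t ih =>
    rcases List.pairwise_cons.1 hl with ⟨ha, ht⟩
    cases p with
    | zero =>
      rw [List.getD_cons_zero, cntLe_cons]
      constructor
      · intro h; simp [h]
      · intro h
        by_contra hn
        have h0 : cntLe t n = 0 := by
          apply cntLe_nil_of_gt
          intro x hx
          have := ha x hx
          omega
        rw [h0, if_neg hn] at h
        simp at h
    | succ q =>
      have hq : q < t.length := by simpa using hp
      rw [List.getD_cons_succ, ih ht q hq, cntLe_cons]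
      by_cases hle : a ≤ n
      · simp [hle]
      · have h0 : cntLe t n = 0 := by
          apply cntLe_nil_of_gt
          intro x hx
          have := ha x hx
          omega
        rw [h0, if_neg hle]
        omega

def nextAv (sk : List Bool) (a : Nat) : Nat :=
  (availOf sk).getD (cntLt (availOf sk) a % (availOf sk).length) 0

theorem cntLe_le_length (l : List Nat) (n : Nat) : cntLe l n ≤ l.length :=
  List.countP_le_length

theorem cntLt_lt_length (l : List Nat) (hl : l.Pairwise (· < ·)) (a : Nat) (ha : a ∈ l) :
    cntLt l a < l.length := by
  have h := cntLe_split l hl a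
  rw [if_pos ha] at h
  have := cntLe_le_length l a
  omega

theorem nextAv_self (sk : List Bool) (a : Nat) (ha : a ∈ availOf sk) : nextAv sk a = a := by
  unfold nextAv
  rw [Nat.mod_eq_of_lt (cntLt_lt_length _ (avail_pairwise sk) a ha)]
  exact getD_cntLt _ (avail_pairwise sk) a ha

theorem avail_le_25 (sk : List Bool) : ∀ x ∈ availOf sk, x ≤ 25 := by
  intro x hx
  have := (mem_availOf sk x).1 hx
  omega

theorem nextAv_cnt (sk : List Bool) (a0 : Nat) (h : a0 < 26) :
    nextAv sk ((a0 + 1) % 26)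
      = (availOf sk).getD (cntLe (availOf sk) a0 % (availOf sk).length) 0 := by
  by_cases h25 : a0 = 25
  · subst h25
    have hm : (25 + 1) % 26 = 0 := by norm_num
    unfold nextAv
    rw [hm, cntLt_zero, Nat.zero_mod, cntLe_all _ _ (avail_le_25 sk), Nat.mod_self]
  · have ha : (a0 + 1) % 26 = a0 + 1 := Nat.mod_eq_of_lt (by omega)
    rw [ha]
    unfold nextAv
    rw [cntLt_succ]

theorem nextAv_skip (sk : List Bool) (a : Nat) (ha : a < 26) (h : sk.getD a false = true) :
    nextAv sk a = nextAv sk ((a + 1) % 26) := by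
  have hnm : a ∉ availOf sk := by
    intro hmem
    have h2 := ((mem_availOf sk a).1 hmem).2
    rw [h] at h2
    exact absurd h2 (by simp)
  have hsplit := cntLe_split (availOf sk) (avail_pairwise sk) a
  rw [if_neg hnm] at hsplit
  by_cases h25 : a = 25
  · subst h25
    have hall : cntLe (availOf sk) 25 = (availOf sk).length :=
      cntLe_all _ _ (avail_le_25 sk)
    unfold nextAv
    have : (25 + 1) % 26 = 0 := by norm_num
    rw [this, cntLt_zero]
    have hlt : cntLt (availOf sk) 25 = (availOf sk).length := by omega
    rw [hlt, Nat.mod_self, Nat.zero_mod]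
  · have hlt : (a + 1) % 26 = a + 1 := Nat.mod_eq_of_lt (by omega)
    unfold nextAv
    rw [hlt, cntLt_succ]
    have heq : cntLe (availOf sk) a = cntLt (availOf sk) a := by omega
    rw [heq]

theorem getD_map_boolToInt (l : List Bool) (a : Nat) (h : a < l.length) :
    (l.map boolToInt).getD a 0 = boolToInt (l.getD a false) := by
  rw [List.getD_eq_getElem _ _ (by simpa using h), List.getD_eq_getElem _ _ h]
  simp

theorem exists_hit (sk : List Bool) (j : Nat) (hj : j < 26) (hja : sk.getD j false = false)
    (a : Nat) (ha : a < 26) : ∃ t, t < 26 ∧ sk.getD ((a + t) % 26) false = false := by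
  refine ⟨(j + 26 - a) % 26, by omega, ?_⟩
  have : (a + (j + 26 - a) % 26) % 26 = j := by omega
  rw [this]
  exact hja

theorem boolToInt_ne_zero (b : Bool) : (boolToInt b ≠ 0) ↔ b = true := by
  cases b <;> simp [boolToInt]

theorem mod26_natCast (a : Nat) : PySem.Int.mod ((a : Nat) : Int) 26 = (((a % 26 : Nat) : Nat) : Int) := by
  exact_mod_cast PySem.Int.mod_natCast a 26

theorem skipWhile_eq (sk : List Bool) (hlen : sk.length = 26) (fuel a : Nat) (ha : a < 26)
    (hex : ∃ t, t < fuel ∧ sk.getD ((a + t) % 26) false = false) :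
    skipWhile (sk.map boolToInt) fuel ((a : Nat) : Int) = ((nextAv sk a : Nat) : Int) := by
  induction fuel generalizing a with
  | zero => rcases hex with ⟨t, ht, _⟩; omega
  | succ f ih =>
    rw [skipWhile]
    have hget : PySem.List.pyGetD (sk.map boolToInt) ((a : Nat) : Int) 0
        = boolToInt (sk.getD a false) := by
      rw [PySem.List.pyGetD_natCast]
      exact getD_map_boolToInt sk a (by omega)
    rw [hget]
    by_cases hb : sk.getD a false = true
    · rw [if_pos ((boolToInt_ne_zero _).2 hb)]
      have hcast : ((a : Nat) : Int) + 1 = (((a + 1 : Nat) : Nat) : Int) := by push_cast; ring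
      rw [hcast, mod26_natCast]
      rcases hex with ⟨t, htf, hts⟩
      have ht0 : t ≠ 0 := by
        intro h0
        rw [h0, Nat.add_zero, Nat.mod_eq_of_lt ha] at hts
        rw [hts] at hb
        exact absurd hb (by simp)
      have hex' : ∃ t', t' < f ∧ sk.getD (((a + 1) % 26 + t') % 26) false = false := by
        refine ⟨t - 1, by omega, ?_⟩
        have : ((a + 1) % 26 + (t - 1)) % 26 = (a + t) % 26 := by omega
        rw [this]
        exact hts
      rw [ih ((a + 1) % 26) (by omega) hex']
      rw [nextAv_skip sk a ha hb]
    · rw [if_neg (by rw [boolToInt_ne_zero]; exact hb)]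
      have hmem : a ∈ availOf sk := (mem_availOf sk a).2 ⟨ha, by simpa using hb⟩
      rw [nextAv_self sk a hmem]

theorem foldl_const_iterate (g : Int → Int) (l : List Int) (x : Int) :
    l.foldl (fun n _ => g n) x = g^[l.length] x := by
  induction l generalizing x with
  | nil => rfl
  | cons a t ih => simp [List.foldl_cons, ih, Function.iterate_succ_apply]

theorem length_availOf_pos (sk : List Bool) (hex : ∃ j, j < 26 ∧ sk.getD j false = false) :
    0 < (availOf sk).length := by
  rcases hex with ⟨j, hj, hjs⟩
  have : j ∈ availOf sk := (mem_availOf sk j).2 ⟨hj, hjs⟩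
  exact List.length_pos_of_mem this

theorem getD_avail_lt (sk : List Bool) (i : Nat) (hi : i < (availOf sk).length) :
    (availOf sk).getD i 0 < 26 := by
  have : (availOf sk).getD i 0 ∈ availOf sk := by
    rw [List.getD_eq_getElem _ _ hi]
    exact List.getElem_mem hi
  exact ((mem_availOf sk _).1 this).1

theorem iter_eq (sk : List Bool) (hlen : sk.length = 26)
    (hex : ∃ j, j < 26 ∧ sk.getD j false = false) (n0 : Int) (k : Nat) :
    (fun n => skipWhile (sk.map boolToInt) 26 (PySem.Int.mod (n + 1) 26))^[k + 1] n0
      = (((availOf sk).getD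
          ((cntLe (availOf sk) (PySem.Int.mod n0 26).toNat + k) % (availOf sk).length) 0
        : Nat) : Int) := by
  rcases hex with ⟨j, hj, hjs⟩
  have hm : 0 < (availOf sk).length := length_availOf_pos sk ⟨j, hj, hjs⟩
  induction k with
  | zero =>
    rw [Function.iterate_one]
    have ha0 : (PySem.Int.mod n0 26).toNat < 26 := by
      rw [PySem.Int.mod_eq_emod_of_pos (by norm_num)]
      omega
    have hmod : PySem.Int.mod (n0 + 1) 26
        = ((((PySem.Int.mod n0 26).toNat + 1) % 26 : Nat) : Int) := by
      rw [PySem.Int.mod_eq_emod_of_pos (by norm_num),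
          PySem.Int.mod_eq_emod_of_pos (by norm_num)]
      omega
    rw [hmod, skipWhile_eq sk hlen 26 _ (by omega)
        (exists_hit sk j hj hjs _ (by omega)),
      nextAv_cnt sk _ ha0]
    simp
  | succ q ihq =>
    rw [Function.iterate_succ_apply', ihq]
    set A := availOf sk
    set i := (cntLe A (PySem.Int.mod n0 26).toNat + q) % A.length with hi
    have hiA : i < A.length := Nat.mod_lt _ hm
    have hv : A.getD i 0 < 26 := getD_avail_lt sk i hiA
    have hcast : ((A.getD i 0 : Nat) : Int) + 1 = (((A.getD i 0 + 1 : Nat) : Nat) : Int) := by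
      push_cast; ring
    rw [hcast, mod26_natCast, skipWhile_eq sk hlen 26 _ (by omega)
        (exists_hit sk j hj hjs _ (by omega)),
      nextAv_cnt sk _ hv, cntLe_getD A (avail_pairwise sk) i hiA]
    have hidx : (i + 1) % A.length
        = (cntLe A (PySem.Int.mod n0 26).toNat + (q + 1)) % A.length := by
      rw [hi, Nat.mod_add_mod, Nat.add_assoc]
    rw [hidx]

theorem advance_eq (A : List Nat) (hA : A.Pairwise (· < ·)) (n : Nat) (d p : Nat)
    (hd : cntLe A n - p = d) (hp : p ≤ cntLe A n) : advance A n p = cntLe A n := by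
  induction d generalizing p with
  | zero =>
    have hpe : p = cntLe A n := by omega
    subst hpe
    rw [advance, dif_neg]
    rintro ⟨h1, h2⟩
    have := (getD_le_iff A hA n (cntLe A n) h1).1 h2
    omega
  | succ q ihq =>
    have hplt : p < cntLe A n := by omega
    have hpl : p < A.length := lt_of_lt_of_le hplt (cntLe_le_length A n)
    have hle : A.getD p 0 ≤ n := (getD_le_iff A hA n p hpl).2 hplt
    rw [advance, dif_pos ⟨hpl, hle⟩]
    exact ihq (p + 1) (by omega) (by omega)

theorem nxt_fold (A : List Nat) (hA : A.Pairwise (· < ·)) (k : Nat) :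
    (List.range k).foldl
        (fun (st : List Nat × Nat) n => (st.1 ++ [advance A n st.2 % A.length], advance A n st.2))
        ([], 0)
      = ((List.range k).map (fun a => cntLe A a % A.length), cntLt A k) := by
  induction k with
  | zero => simp [cntLt_zero]
  | succ q ihq =>
    rw [List.range_succ, List.foldl_append, ihq, List.foldl_cons, List.foldl_nil,
        List.map_append]
    have hadv : advance A q (cntLt A q) = cntLe A q :=
      advance_eq A hA q _ _ rfl (cntLt_le_cntLe A q)
    rw [hadv, cntLt_succ]
    simp

theorem sL_eq_map (L : List Char) (hr : ∀ c ∈ L, 71 ≤ c.toNat ∧ c.toNat ≤ 122)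
    (init : List Bool) (hlen : init.length = 26) :
    L.foldl (fun sL sk => PySem.List.pySetD sL ((sk.toNat : Int) - 97) 1)
        (init.map boolToInt)
      = (L.foldl (fun sk c => sk.set (PySem.Int.mod ((c.toNat : Int) - 97) 26).toNat true)
          init).map boolToInt := by
  induction L generalizing init with
  | nil => simp
  | cons c t ih =>
    rcases hr c (by simp) with ⟨h1, h2⟩
    rw [List.foldl_cons, List.foldl_cons]
    have hstep : PySem.List.pySetD (init.map boolToInt) ((c.toNat : Int) - 97) 1
        = (init.set (PySem.Int.mod ((c.toNat : Int) - 97) 26).toNat true).map boolToInt := by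
      have hmaplen : (init.map boolToInt).length = 26 := by simpa using hlen
      have hidx : PySem.List.pyIdx? (init.map boolToInt).length ((c.toNat : Int) - 97)
          = some (PySem.Int.mod ((c.toNat : Int) - 97) 26).toNat := by
        rw [hmaplen]
        unfold PySem.List.pyIdx?
        rw [PySem.Int.mod_eq_emod_of_pos (by norm_num)]
        by_cases h0 : (0 : Int) ≤ (c.toNat : Int) - 97
        · rw [if_pos h0, if_pos (by omega)]
          congr 1
          omega
        · rw [if_neg h0, if_pos (by omega)]
          congr 1
          omega
      unfold PySem.List.pySetD PySem.List.pySet?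
      rw [hidx]
      simp only [Option.map_some, Option.getD_some]
      rw [List.map_set]
      rfl
    rw [hstep]
    exact ih (fun x hx => hr x (List.mem_cons_of_mem _ hx)) _ (by simpa using hlen)

theorem main_eq (s : String) (skip : String) (index : Int)
    (hpre : (∀ c ∈ skip.toList, 71 ≤ c.toNat ∧ c.toNat ≤ 122) ∧
      (1 ≤ index → s.toList = [] ∨
        ∃ j ∈ List.range 26, ∀ c ∈ skip.toList,
          (PySem.Int.mod ((c.toNat : Int) - 97) 26).toNat ≠ j)) :
    solution s skip index = solution_alt s skip index := by
  rcases hpre with ⟨hr, hav⟩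
  simp only [solution, solution_alt]
  by_cases hcond : index ≤ 0 ∨ s.toList = []
  · rw [if_pos hcond]
    rcases hcond with hidx | hnil
    · have hr0 : PySem.List.pyRange 0 index 1 = [] := PySem.List.pyRange_one_eq_nil (by omega)
      simp only [hr0, List.foldl_nil]
      rw [PySem.List.foldl_append_singleton_eq_map, List.nil_append]
      have hid : ∀ c : Char, Char.ofNat (((c.toNat : Int) - 97) + 97).toNat = c := by
        intro c
        have h1 : ((c.toNat : Int) - 97) + 97 = (c.toNat : Int) := by ring
        rw [h1, Int.toNat_natCast, Char.ofNat_toNat]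
      simp only [hid, List.map_id', String.ofList_toList]
    · simp only [hnil, List.foldl_nil]
      conv_rhs => rw [← String.ofList_toList (s := s), hnil]
  · rw [if_neg hcond]
    have hidx : 0 < index := by
      rcases (not_or.1 hcond) with ⟨h1, _⟩
      omega
    have hsne : s.toList ≠ [] := (not_or.1 hcond).2
    rcases hav (by omega) with hnil | ⟨j, hjmem, hj⟩
    · exact absurd hnil hsne
    set L := skip.toList with hL
    set skippedL := L.foldl
      (fun sk c => sk.set (PySem.Int.mod ((c.toNat : Int) - 97) 26).toNat true)
      (List.replicate 26 false) with hskdef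
    have hlen : skippedL.length = 26 := by
      rw [hskdef, foldl_set_length]
      simp
    have hjlt : j < 26 := by simpa using hjmem
    have hg : ∀ c ∈ L, (PySem.Int.mod ((c.toNat : Int) - 97) 26).toNat
        < (List.replicate 26 false).length := by
      intro c _
      rw [PySem.Int.mod_eq_emod_of_pos (by norm_num)]
      simp only [List.length_replicate]
      omega
    have hskj : skippedL.getD j false = false := by
      rw [hskdef, foldl_set_getD _ _ _ _ hg, List.getD_replicate _ hjlt]
      have hany : L.any (fun c => (PySem.Int.mod ((c.toNat : Int) - 97) 26).toNat == j)
          = false := by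
        rw [List.any_eq_false]
        intro c hc
        simpa using hj c hc
      rw [hany]
      rfl
    have hexsk : ∃ j', j' < 26 ∧ skippedL.getD j' false = false := ⟨j, hjlt, hskj⟩
    set A := availOf skippedL with hAdef
    have hm : 0 < A.length := length_availOf_pos _ hexsk
    have hApw : A.Pairwise (· < ·) := avail_pairwise skippedL
    have hsL : L.foldl (fun sL sk => PySem.List.pySetD sL ((sk.toNat : Int) - 97) 1)
        (List.replicate 26 (0 : Int)) = skippedL.map boolToInt := by
      have h0 : (List.replicate 26 (0 : Int)) = (List.replicate 26 false).map boolToInt := by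
        simp [boolToInt]
      rw [h0, sL_eq_map L hr _ (by simp)]
    set k := index.toNat - 1 with hkdef
    have hik : index = ((k + 1 : Nat) : Int) := by omega
    have hfilter : (List.range 26).filter (fun n => !skippedL.getD n false) = A := rfl
    have hnxt : ((List.range 26).foldl
        (fun (st : List Nat × Nat) n =>
          (st.1 ++ [advance A n st.2 % A.length], advance A n st.2)) ([], 0)).1
        = (List.range 26).map (fun a => cntLe A a % A.length) := by
      rw [nxt_fold A hApw 26]
    rw [hsL, hfilter, hnxt, PySem.List.foldl_append_singleton_eq_map, List.nil_append]
    apply congrArg String.ofList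
    apply List.map_congr_left
    intro c _
    have hlenRange : (PySem.List.pyRange 0 index 1).length = k + 1 := by
      rw [PySem.List.length_pyRange_one]
      omega
    rw [foldl_const_iterate, hlenRange, iter_eq skippedL hlen hexsk]
    set a0 : Nat := (PySem.Int.mod ((c.toNat : Int) - 97) 26).toNat with ha0def
    have ha0 : a0 < 26 := by
      rw [ha0def, PySem.Int.mod_eq_emod_of_pos (by norm_num)]
      omega
    rw [PySem.List.getD_map_range _ 26 a0 0 ha0]
    have hval : PySem.Int.mod ((((cntLe A a0 % A.length : Nat)) : Int) + index - 1)
        ((A.length : Nat) : Int) = (((cntLe A a0 + k) % A.length : Nat) : Int) := by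
      have h1 : (((cntLe A a0 % A.length : Nat)) : Int) + index - 1
          = (((cntLe A a0 % A.length + k : Nat)) : Int) := by
        rw [hik]
        push_cast
        ring
      rw [h1, PySem.Int.mod_natCast, Nat.mod_add_mod]
    rw [hval, Int.toNat_natCast]
    have hv : ((((A.getD ((cntLe A a0 + k) % A.length) 0 : Nat)) : Int) + 97).toNat
        = A.getD ((cntLe A a0 + k) % A.length) 0 + 97 := by omega
    rw [hv]

-- ===== VERDICT (by name: the statement is the Claim_ definition above) =====
theorem solution_spec : Claim_equal_solution := by
  intro s skip index _ hpre
  unfold Pre_solution at hpre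
  unfold Spec_solution
  apply main_eq s skip index
  constructor
  · intro c hc
    have := List.all_eq_true.1 hpre.1 c hc
    simpa using this
  · intro h1
    rcases hpre.2 h1 with h | h
    · exact Or.inl h
    · right
      rcases List.any_eq_true.1 h with ⟨j, hj, hall⟩
      exact ⟨j, hj, fun c hc => by simpa using List.all_eq_true.1 hall c hc⟩
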